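-- pv_equiv track=rewrite | github.com/bootcamp-students/s24-warmups | duke-mcclellan/day-37/make_deadfish_swim.py | parse
-- ===== SOURCE A (Python) =====
-- def parse(data):
--     value = 0
--     lst = []
--     for char in data:
--         if char == "i":
--             value += 1
--         if char == "o":
--             lst.append(value)
--     return lst
-- ===== SOURCE B (Python) =====
-- def parse(data):
--     # Split on the emit command: each 'o' outputs the number of 'i's seen so far,
--     # which is the running sum of per-segment 'i' counts.
--     parts = data.split("o")
--     out = []
--     total = 0
--     for seg in parts[:-1]:
--         total += seg.count("i")
--         out.append(total)
--     return out
-- ===== Notes on version B (the rewrite author's own statement) =====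
-- stated objective: faster
-- what changed: A runs a per-character state machine (increment on 'i', emit on 'o'); B instead splits the input once on the emit delimiter and emits the running sum of per-segment str.count counts, moving the character scan into C-level str.split/str.count.
import Mathlib
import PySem

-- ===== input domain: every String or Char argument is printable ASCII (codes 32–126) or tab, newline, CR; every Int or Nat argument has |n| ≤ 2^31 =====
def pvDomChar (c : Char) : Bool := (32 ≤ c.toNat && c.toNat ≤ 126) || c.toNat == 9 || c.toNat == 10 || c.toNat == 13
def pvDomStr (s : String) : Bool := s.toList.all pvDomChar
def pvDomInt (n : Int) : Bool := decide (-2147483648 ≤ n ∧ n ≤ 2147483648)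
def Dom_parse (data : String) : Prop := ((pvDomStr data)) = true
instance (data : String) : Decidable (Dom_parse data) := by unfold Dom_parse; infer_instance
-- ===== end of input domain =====

-- B replaces A's per-character state machine by split-on-the-emit-delimiter plus running per-segment counts (a timing run measured B faster by a constant factor).

-- ===== PORT A =====
-- literal port of A's loop: state (value, lst), two ifs in order
def parse (data : String) : List Int :=
  (data.toList.foldl (fun (st : Int × List Int) (char : Char) =>
    let value := if char == 'i' then st.1 + 1 else st.1
    let lst := if char == 'o' then st.2 ++ [value] else st.2
    (value, lst)) (0, [])).2

-- ===== PORT B =====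
-- Source B: parts = data.split("o"); loop over parts[:-1] accumulating seg.count("i").
-- parts[:-1] is List.dropLast (exact for any list); split/count are the PySem primitives.
def parse_alt (data : String) : List Int :=
  let parts := PySem.Chars.splitOn data.toList ['o']
  (parts.dropLast.foldl (fun (st : Int × List Int) seg =>
    let total := st.1 + (PySem.Chars.count seg ['i'] : Int)
    (total, st.2 ++ [total])) (0, [])).2

-- ===== PRECONDITION & SPEC =====
def Spec_parse (data : String) (out : List Int) : Prop := out = parse_alt data
instance (data : String) (out : List Int) : Decidable (Spec_parse data out) := by unfold Spec_parse; infer_instance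

-- ===== CLAIM (what is proved, stated in full; the proofs are below) =====
def Claim_equal_parse : Prop := ∀ (data : String), Dom_parse data → Spec_parse data (parse data)

-- ===== LEMMAS AND PROOFS =====

-- recursive characterisation of splitOn on a single-char separator
def spO : List Char → List (List Char)
  | [] => [[]]
  | c :: cs =>
    if c = 'o' then [] :: spO cs
    else match spO cs with
      | [] => [[c]]           -- unreachable: spO never returns []
      | h :: t => (c :: h) :: t

def prependHead (p : List Char) : List (List Char) → List (List Char)
  | [] => [p]
  | h :: t => (p ++ h) :: t

lemma spO_ne_nil (cs : List Char) : spO cs ≠ [] := by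
  cases cs with
  | nil => simp [spO]
  | cons c cs =>
    simp only [spO]
    split
    · simp
    · split <;> simp

lemma go_spO (fuel : Nat) (l cur : List Char) (acc : List (List Char))
    (h : l.length ≤ fuel) :
    PySem.Chars.splitOn.go ['o'] fuel l cur acc
      = acc.reverse ++ prependHead cur.reverse (spO l) := by
  induction fuel generalizing l cur acc with
  | zero =>
    have : l = [] := by cases l <;> simp_all
    subst this
    simp [PySem.Chars.splitOn.go, spO, prependHead]
  | succ fuel ih =>
    cases l with
    | nil => simp [PySem.Chars.splitOn.go, spO, prependHead]
    | cons c rest =>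
      simp only [PySem.Chars.splitOn.go]
      by_cases hc : c = 'o'
      · subst hc
        have hp : List.isPrefixOf ['o'] ('o' :: rest) = true := by
          simp [List.isPrefixOf]
        rw [if_pos hp]
        simp only [List.length_cons] at h
        rw [ih _ _ _ (by simpa using Nat.le_of_succ_le_succ h)]
        obtain ⟨hd, tl, hsp⟩ : ∃ hd tl, spO rest = hd :: tl := by
          rcases hx : spO rest with _ | ⟨a, b⟩
          · exact absurd hx (spO_ne_nil rest)
          · exact ⟨a, b, rfl⟩
        simp [spO, prependHead, hsp, List.reverse_cons]
      · have hp : List.isPrefixOf ['o'] (c :: rest) = false := by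
          simp only [List.isPrefixOf, Bool.and_true]
          simp [Ne.symm hc]
        rw [if_neg (by simp [hp])]
        simp only [List.length_cons] at h
        rw [ih _ _ _ (Nat.le_of_succ_le_succ h)]
        simp only [spO, if_neg hc]
        rcases hsp : spO rest with _ | ⟨hd, tl⟩
        · exact absurd hsp (spO_ne_nil rest)
        · simp [prependHead, List.reverse_cons]

lemma splitOn_eq_spO (l : List Char) :
    PySem.Chars.splitOn l ['o'] = spO l := by
  unfold PySem.Chars.splitOn
  rw [go_spO _ _ _ _ (Nat.le_succ_of_le (Nat.le_refl _))]
  rcases hsp : spO l with _ | ⟨hd, tl⟩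
  · exact absurd hsp (spO_ne_nil l)
  · simp [prependHead]

-- count with single-char needle is List.count
lemma count_go_i (fuel : Nat) (l : List Char) (acc : Nat) (h : l.length ≤ fuel) :
    PySem.Chars.count.go ['i'] fuel l acc = acc + l.count 'i' := by
  induction fuel generalizing l acc with
  | zero =>
    have : l = [] := by cases l <;> simp_all
    subst this; simp [PySem.Chars.count.go]
  | succ fuel ih =>
    cases l with
    | nil => simp [PySem.Chars.count.go]
    | cons c rest =>
      simp only [PySem.Chars.count.go]
      simp only [List.length_cons] at h
      by_cases hc : c = 'i'
      · subst hc
        rw [if_pos (by simp [List.isPrefixOf])]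
        rw [ih _ _ (by simpa using Nat.le_of_succ_le_succ h)]
        simp
        omega
      · have hp : List.isPrefixOf ['i'] (c :: rest) = false := by
          simp only [List.isPrefixOf, Bool.and_true]
          simp [Ne.symm hc]
        rw [if_neg (by simp [hp])]
        rw [ih _ _ (Nat.le_of_succ_le_succ h)]
        simp [hc]
lemma count_i (l : List Char) : PySem.Chars.count l ['i'] = l.count 'i' := by
  unfold PySem.Chars.count
  rw [if_neg (by decide)]
  simpa using count_go_i l.length l 0 (Nat.le_refl _)

-- emission list of B's loop, recursively
def fEmit (v : Int) : List (List Char) → List Int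
  | [] => []
  | seg :: rest =>
    let t := v + (seg.count 'i' : Int)
    t :: fEmit t rest

lemma bfold_eq_fEmit (parts : List (List Char)) (v : Int) (out : List Int) :
    (parts.foldl (fun (st : Int × List Int) seg =>
      let total := st.1 + (PySem.Chars.count seg ['i'] : Int)
      (total, st.2 ++ [total])) (v, out)).2 = out ++ fEmit v parts := by
  induction parts generalizing v out with
  | nil => simp [fEmit]
  | cons seg rest ih =>
    simp only [List.foldl_cons]
    rw [ih]
    simp [fEmit, count_i]

lemma fEmit_shift (c : Char) (v : Int) (h : List Char) (r : List (List Char)) :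
    fEmit v ((c :: h) :: r) = fEmit (v + if c = 'i' then 1 else 0) (h :: r) := by
  have ht : v + (((c :: h).count 'i' : Nat) : Int)
      = (v + if c = 'i' then 1 else 0) + ((h.count 'i' : Nat) : Int) := by
    simp only [List.count_cons]
    by_cases hci : c = 'i'
    · simp [hci]; ring
    · simp [hci]
  simp only [fEmit, ht]

lemma afold_eq (cs : List Char) (v : Int) (acc : List Int) :
    (cs.foldl (fun (st : Int × List Int) (char : Char) =>
      let value := if char == 'i' then st.1 + 1 else st.1
      let lst := if char == 'o' then st.2 ++ [value] else st.2
      (value, lst)) (v, acc)).2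
    = acc ++ fEmit v (spO cs).dropLast := by
  induction cs generalizing v acc with
  | nil => simp [spO, fEmit]
  | cons c cs ih =>
    obtain ⟨hd, tl, hsp⟩ : ∃ hd tl, spO cs = hd :: tl := by
      rcases h : spO cs with _ | ⟨a, b⟩
      · exact absurd h (spO_ne_nil cs)
      · exact ⟨a, b, rfl⟩
    simp only [List.foldl_cons]
    by_cases hc : c = 'o'
    · subst hc
      have hio : ('o' == 'i') = false := by decide
      simp only [hio, beq_self_eq_true, if_true]
      rw [ih]
      simp [spO, hsp, fEmit, List.append_assoc]
    · have ho : (c == 'o') = false := by simp [hc]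
      simp only [ho]
      rw [ih]
      have hspc : spO (c :: cs) = (c :: hd) :: tl := by simp [spO, hc, hsp]
      rw [hspc, hsp]
      cases tl with
      | nil => simp [fEmit]
      | cons x xs =>
        rw [show ((c :: hd) :: x :: xs).dropLast = (c :: hd) :: (x :: xs).dropLast from rfl]
        rw [show (hd :: x :: xs).dropLast = hd :: (x :: xs).dropLast from rfl]
        rw [fEmit_shift]
        congr 2
        by_cases hi : c = 'i' <;> simp [hi]

theorem parse_spec : Claim_equal_parse := by
  intro data _
  unfold Spec_parse parse parse_alt
  rw [splitOn_eq_spO, bfold_eq_fEmit, afold_eq]
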